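-- pv_equiv track=rewrite | github.com/Seb010/Python-Password-Checker | password.py | check_if_there_are_consecutive_upercase_letters
-- ===== SOURCE A (Python) =====
-- def check_if_there_are_consecutive_upercase_letters(input):
--     counter = 0
--     for i in input:
--         if counter == 3:
--             return True
--         if i.isupper():
--             counter = counter + 1
--         else:
--             counter = 0
--     if counter == 3:
--         return True
--     return False
-- ===== SOURCE B (Python) =====
-- def check_if_there_are_consecutive_upercase_letters(input):
--     return any(a.isupper() and b.isupper() and c.isupper()
--                for a, b, c in zip(input, input[1:], input[2:]))
-- ===== Notes on version B (the rewrite author's own statement) =====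
-- stated objective: idiomatic
-- what changed: Replaces the stateful counter-threading scan with a stateless sliding-window test: any triple of adjacent characters that are all uppercase, written as any() over zip of the string with its two shifts.
import Mathlib
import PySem

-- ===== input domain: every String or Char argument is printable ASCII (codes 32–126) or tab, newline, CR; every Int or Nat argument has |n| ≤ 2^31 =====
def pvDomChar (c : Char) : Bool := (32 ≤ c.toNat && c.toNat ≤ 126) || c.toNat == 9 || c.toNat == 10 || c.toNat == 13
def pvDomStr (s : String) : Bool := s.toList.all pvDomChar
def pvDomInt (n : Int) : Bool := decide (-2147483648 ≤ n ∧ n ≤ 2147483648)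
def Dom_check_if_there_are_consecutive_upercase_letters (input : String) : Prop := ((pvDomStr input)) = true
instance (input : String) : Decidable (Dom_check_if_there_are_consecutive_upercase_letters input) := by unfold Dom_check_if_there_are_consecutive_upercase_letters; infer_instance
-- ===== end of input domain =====

-- B replaces A's stateful run counter with a stateless sliding window over adjacent character
-- triples (more idiomatic); return values are proved equal on all of Dom.

-- ===== PORT A =====
-- the for-loop with early return: counter threaded through the characters
def pvAGo (counter : Int) : List Char → Bool
  | [] => counter == 3
  | c :: rest =>
      if counter == 3 then true
      else if PySem.Chars.isupper c then pvAGo (counter + 1) rest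
      else pvAGo 0 rest

def check_if_there_are_consecutive_upercase_letters (input : String) : Bool :=
  pvAGo 0 input.toList

-- ===== PORT B =====
-- zip(input, input[1:], input[2:]) with any(): slide a window of three adjacent chars
def pvBGo : List Char → Bool
  | a :: b :: c :: rest =>
      (PySem.Chars.isupper a && PySem.Chars.isupper b && PySem.Chars.isupper c)
        || pvBGo (b :: c :: rest)
  | _ => false

def check_if_there_are_consecutive_upercase_letters_alt (input : String) : Bool :=
  pvBGo input.toList

-- ===== PRECONDITION & SPEC =====
def Spec_check_if_there_are_consecutive_upercase_letters (input : String) (out : Bool) : Prop := out = check_if_there_are_consecutive_upercase_letters_alt input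
instance (input : String) (out : Bool) : Decidable (Spec_check_if_there_are_consecutive_upercase_letters input out) := by unfold Spec_check_if_there_are_consecutive_upercase_letters; infer_instance

-- ===== CLAIM (what is proved, stated in full; the proofs are below) =====
def Claim_equal_check_if_there_are_consecutive_upercase_letters : Prop := ∀ (input : String), Dom_check_if_there_are_consecutive_upercase_letters input → Spec_check_if_there_are_consecutive_upercase_letters input (check_if_there_are_consecutive_upercase_letters input)

-- ===== LEMMAS AND PROOFS =====

-- "the first m chars exist and are all uppercase"
def pvPrefixUp : Nat → List Char → Bool
  | 0, _ => true
  | _ + 1, [] => false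
  | m + 1, c :: rest => PySem.Chars.isupper c && pvPrefixUp m rest

theorem pvAGo_three (l : List Char) : pvAGo 3 l = true := by
  cases l <;> simp [pvAGo]

theorem pvPrefixUp_mono (l : List Char) (m : Nat) (hm : m ≤ 2) :
    pvPrefixUp 2 l = true → pvPrefixUp m l = true := by
  intro h
  interval_cases m
  · rfl
  · cases l with
    | nil => simp [pvPrefixUp] at h
    | cons c rest => simp [pvPrefixUp] at h ⊢; exact h.1
  · exact h

theorem pvPrefixUp3_imp_pvBGo (l : List Char) :
    pvPrefixUp 3 l = true → pvBGo l = true := by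
  match l with
  | [] => simp [pvPrefixUp]
  | [a] => simp [pvPrefixUp]
  | [a, b] => simp [pvPrefixUp]
  | a :: b :: c :: rest =>
      intro h
      simp [pvPrefixUp] at h
      simp [pvBGo, h.1, h.2.1, h.2.2]

theorem pvBGo_cons (c : Char) (cs : List Char) :
    pvBGo (c :: cs) = ((PySem.Chars.isupper c && pvPrefixUp 2 cs) || pvBGo cs) := by
  match cs with
  | [] => simp [pvBGo, pvPrefixUp]
  | [b] => simp [pvBGo, pvPrefixUp]
  | b :: d :: rest => simp [pvBGo, pvPrefixUp, Bool.and_assoc]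

theorem pvMain (l : List Char) :
    (pvAGo 0 l = (pvPrefixUp 3 l || pvBGo l)) ∧
    (pvAGo 1 l = (pvPrefixUp 2 l || pvBGo l)) ∧
    (pvAGo 2 l = (pvPrefixUp 1 l || pvBGo l)) := by
  induction l with
  | nil => simp [pvAGo, pvPrefixUp, pvBGo]
  | cons c cs ih =>
      obtain ⟨ih0, ih1, ih2⟩ := ih
      by_cases hu : PySem.Chars.isupper c = true
      · refine ⟨?_, ?_, ?_⟩
        · have l1 : pvAGo 0 (c :: cs) = pvAGo 1 cs := by simp [pvAGo, hu]
          have e : pvPrefixUp 3 (c :: cs) = pvPrefixUp 2 cs := by simp [pvPrefixUp, hu]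
          rw [l1, ih1, e, pvBGo_cons, hu]
          cases h2 : pvPrefixUp 2 cs <;> cases hb : pvBGo cs <;> simp
        · have l1 : pvAGo 1 (c :: cs) = pvAGo 2 cs := by simp [pvAGo, hu]
          have e : pvPrefixUp 2 (c :: cs) = pvPrefixUp 1 cs := by simp [pvPrefixUp, hu]
          rw [l1, ih2, e, pvBGo_cons, hu]
          cases h2 : pvPrefixUp 2 cs
          · simp
          · have h1 : pvPrefixUp 1 cs = true := pvPrefixUp_mono cs 1 (by omega) h2
            simp [h1]
        · have l1 : pvAGo 2 (c :: cs) = pvAGo 3 cs := by simp [pvAGo, hu]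
          have e : pvPrefixUp 1 (c :: cs) = true := by simp [pvPrefixUp, hu]
          rw [l1, pvAGo_three, e]
          simp
      · have hu' : PySem.Chars.isupper c = false := by simpa using hu
        have l1 : ∀ k : Int, k ≠ 3 → pvAGo k (c :: cs) = pvAGo 0 cs := by
          intro k hk
          simp [pvAGo, hu', hk]
        have hb : pvBGo (c :: cs) = pvBGo cs := by rw [pvBGo_cons, hu']; simp
        refine ⟨?_, ?_, ?_⟩ <;>
          · rw [l1 _ (by decide), ih0, hb]
            simp only [pvPrefixUp, hu', Bool.false_and, Bool.false_or]
            cases h3 : pvPrefixUp 3 cs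
            · simp
            · simp [pvPrefixUp3_imp_pvBGo cs h3]

-- ===== VERDICT (by name: the statement is the Claim_ definition above) =====
theorem check_if_there_are_consecutive_upercase_letters_spec : Claim_equal_check_if_there_are_consecutive_upercase_letters := by
  intro input _
  unfold Spec_check_if_there_are_consecutive_upercase_letters
  unfold check_if_there_are_consecutive_upercase_letters check_if_there_are_consecutive_upercase_letters_alt
  rw [(pvMain input.toList).1]
  cases h3 : pvPrefixUp 3 input.toList
  · simp
  · simp [pvPrefixUp3_imp_pvBGo _ h3]
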